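-- pv_equiv track=rewrite | github.com/jcolinpatrick/kryptos | scripts/_uncategorized/e_s_13_keyword_transposition.py | myszkowski_encrypt_perm
-- ===== SOURCE A (Python) =====
-- from collections import Counter, defaultdict
--
-- def myszkowski_encrypt_perm(keyword, length):
--     """Myszkowski transposition: repeated letters share the same column number,
--     and their positions are read left-to-right across rows.
--     """
--     width = len(keyword)
--     n_rows = (length + width - 1) // width
--
--     # Group columns by letter
--     col_groups = defaultdict(list)
--     for i, c in enumerate(keyword):
--         col_groups[c].append(i)
--
--     # Sort groups by letter
--     sorted_letters = sorted(col_groups.keys())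
--
--     perm = []
--     for letter in sorted_letters:
--         cols = col_groups[letter]
--         if len(cols) == 1:
--             # Single column: read top to bottom
--             col = cols[0]
--             for row in range(n_rows):
--                 pos = row * width + col
--                 if pos < length:
--                     perm.append(pos)
--         else:
--             # Multiple columns: read row by row, left to right across these columns
--             for row in range(n_rows):
--                 for col in cols:
--                     pos = row * width + col
--                     if pos < length:
--                         perm.append(pos)
--
--     return perm
-- ===== SOURCE B (Python) =====
-- def myszkowski_encrypt_perm(keyword, length):
--     """Myszkowski transposition read-order as one stable sort: position i lives in
--     column i % width, and the stable sort by that column's keyword letter reproduces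
--     the group-by-letter, then row-by-row, left-to-right reading order."""
--     width = len(keyword)
--     return sorted(range(length), key=lambda i: keyword[i % width])
-- ===== Notes on version B (the rewrite author's own statement) =====
-- stated objective: simpler
-- what changed: Replaces the defaultdict column grouping, the sort of the distinct letters and the nested group/row/column append loops (plus the redundant single-column special case) by a single stable sort of range(length) keyed by each position's keyword letter.
import Mathlib
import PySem

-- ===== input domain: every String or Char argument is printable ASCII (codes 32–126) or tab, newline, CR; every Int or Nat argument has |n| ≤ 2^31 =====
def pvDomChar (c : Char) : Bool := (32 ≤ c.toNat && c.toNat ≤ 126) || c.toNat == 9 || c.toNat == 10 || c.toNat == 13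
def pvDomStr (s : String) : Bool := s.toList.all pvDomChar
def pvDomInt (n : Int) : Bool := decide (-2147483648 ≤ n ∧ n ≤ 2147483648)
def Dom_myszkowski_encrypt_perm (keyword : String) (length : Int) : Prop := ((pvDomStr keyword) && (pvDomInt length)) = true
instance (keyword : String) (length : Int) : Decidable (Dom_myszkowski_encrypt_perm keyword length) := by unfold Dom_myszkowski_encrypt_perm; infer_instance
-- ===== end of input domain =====

-- B replaces A's defaultdict grouping, letter sort and nested group/row/column loops by one
-- stable sort of range(length) keyed by each position's keyword letter (objective: simpler).

-- ===== PORT A =====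
def myszkowski_encrypt_perm (keyword : String) (length : Int) : List Int :=
  let width : Int := PySem.Str.len keyword
  let n_rows : Int := PySem.Int.floordiv (length + width - 1) width
  let col_groups : PySem.Dict Char (List Int) :=
    (PySem.List.enumerate keyword.toList).foldl
      (fun d p => d.modify p.2 [] (fun l => l ++ [p.1])) PySem.Dict.empty
  let sorted_letters := PySem.List.sorted col_groups.keys (fun c => c) false
  sorted_letters.foldl (fun perm letter =>
    let cols := col_groups.getD letter []
    if cols.length = 1 then
      -- cols[0]: exact, this branch has len(cols) == 1 so index 0 is in range
      let col := (PySem.List.pyGet? cols 0).getD 0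
      (PySem.List.pyRange 0 n_rows).foldl (fun perm row =>
        let pos := row * width + col
        if pos < length then perm ++ [pos] else perm) perm
    else
      (PySem.List.pyRange 0 n_rows).foldl (fun perm row =>
        cols.foldl (fun perm col =>
          let pos := row * width + col
          if pos < length then perm ++ [pos] else perm) perm) perm) []

-- ===== PORT B =====
def myszkowski_encrypt_perm_alt (keyword : String) (length : Int) : List Int :=
  let width : Int := PySem.Str.len keyword
  -- keyword[i % width]: exact, for every i sorted inspects 0 ≤ i % width < len(keyword),
  -- so pyGet? is some _ and the .getD default is never used
  PySem.List.sorted (PySem.List.pyRange 0 length)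
    (fun i => (PySem.List.pyGet? keyword.toList (PySem.Int.mod i width)).getD ' ') false

-- ===== PRECONDITION & SPEC =====
-- Pre_ excludes exactly the empty keyword, on which A raises ZeroDivisionError (len(keyword) = 0).
def Pre_myszkowski_encrypt_perm (keyword : String) (length : Int) : Prop := keyword ≠ ""
instance (keyword : String) (length : Int) : Decidable (Pre_myszkowski_encrypt_perm keyword length) := by unfold Pre_myszkowski_encrypt_perm; infer_instance
def pvWitness_myszkowski_encrypt_perm : String × Int := ("TOMATO", 11)

def Spec_myszkowski_encrypt_perm (keyword : String) (length : Int) (out : List Int) : Prop := out = myszkowski_encrypt_perm_alt keyword length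
instance (keyword : String) (length : Int) (out : List Int) : Decidable (Spec_myszkowski_encrypt_perm keyword length out) := by unfold Spec_myszkowski_encrypt_perm; infer_instance

-- ===== CLAIM (what is proved, stated in full; the proofs are below) =====
def Claim_equal_myszkowski_encrypt_perm : Prop := ∀ (keyword : String) (length : Int), Dom_myszkowski_encrypt_perm keyword length → Pre_myszkowski_encrypt_perm keyword length → Spec_myszkowski_encrypt_perm keyword length (myszkowski_encrypt_perm keyword length)

-- ===== LEMMAS AND PROOFS =====

-- the key B sorts by: the keyword letter of position p's column
def pvKeyB (cs : List Char) (p : Int) : Char :=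
  (PySem.List.pyGet? cs (PySem.Int.mod p (cs.length : Int))).getD ' '

-- the column indices of letter L, as A's defaultdict collects them
def pvColsOf (cs : List Char) (L : Char) : List Int :=
  (cs.zipIdx.filter (fun p => p.1 == L)).map (fun p => (p.2 : Int))

-- ---- small list facts ----

lemma pv_flatMap_congr_mem {α β : Type} (l : List α) (f g : α → List β)
    (h : ∀ a ∈ l, f a = g a) : l.flatMap f = l.flatMap g := by
  induction l with
  | nil => simp
  | cons a l ih => simp [h a (by simp), ih (fun a ha => h a (by simp [ha]))]

lemma pv_flatMap_ite_singleton {α β : Type} (q : α → Bool) (f : α → β) (l : List α) :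
    l.flatMap (fun r => if q r then [f r] else []) = (l.filter q).map f := by
  induction l with
  | nil => simp
  | cons a l ih => by_cases h : q a <;> simp [h, ih]

lemma pv_range_filter_lt (n m : ℕ) (h : n ≤ m) :
    (List.range m).filter (fun i => decide (i < n)) = List.range n := by
  obtain ⟨d, rfl⟩ := Nat.exists_eq_add_of_le h
  rw [List.range_add, List.filter_append]
  have h1 : (List.range n).filter (fun i => decide (i < n)) = List.range n :=
    List.filter_eq_self.mpr (by intro a ha; simpa using List.mem_range.mp ha)
  have h2 : ((List.range d).map (fun x => n + x)).filter (fun i => decide (i < n)) = [] := by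
    rw [List.filter_eq_nil_iff]; intro a ha
    simp only [List.mem_map] at ha
    obtain ⟨b, _, rfl⟩ := ha
    simp
  rw [h1, h2, List.append_nil]

lemma pv_range_mul_flatMap (R w : ℕ) :
    List.range (R * w) = (List.range R).flatMap (fun r => (List.range w).map (fun c => r * w + c)) := by
  induction R with
  | zero => simp
  | succ R ih =>
    rw [Nat.succ_mul, List.range_add, ih, List.range_succ, List.flatMap_append]
    simp

lemma pv_zipIdx_filter_map (L d : Char) (cs : List Char) : ∀ (k : ℕ),
    ((cs.zipIdx k).filter (fun p => p.1 == L)).map (fun p => p.2)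
      = ((List.range cs.length).filter (fun i => cs.getD i d == L)).map (fun i => i + k) := by
  induction cs with
  | nil => intro k; simp
  | cons c cs ih =>
    intro k
    rw [List.zipIdx_cons, List.filter_cons]
    have hrange : List.range (c :: cs).length = 0 :: (List.range cs.length).map Nat.succ := by
      simpa using List.range_succ_eq_map
    rw [hrange, List.filter_cons]
    have htail : ((List.range cs.length).map Nat.succ).filter (fun i => (c :: cs).getD i d == L)
        = ((List.range cs.length).filter (fun i => cs.getD i d == L)).map Nat.succ := by
      rw [List.filter_map]
      congr 1
    by_cases hc : c == L
    · rw [if_pos hc, List.map_cons, ih (k + 1), htail, List.getD_cons_zero, if_pos hc,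
        List.map_cons, List.map_map]
      refine congrArg₂ List.cons (by omega) ?_
      apply List.map_congr_left
      intro i _
      simp only [Function.comp, Nat.succ_eq_add_one]
      omega
    · rw [if_neg hc, ih (k + 1), htail, List.getD_cons_zero, if_neg hc, List.map_map]
      apply List.map_congr_left
      intro i _
      simp only [Function.comp, Nat.succ_eq_add_one]
      omega

-- ---- insertion into a key-grouped list (the stable-sort characterisation) ----

lemma pv_ins_append {α : Type} (before : α → α → Bool) (x : α) (ys zs : List α)
    (h : ∀ y ∈ ys, before x y = false) :
    PySem.List.insertBy before x (ys ++ zs) = ys ++ PySem.List.insertBy before x zs := by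
  induction ys with
  | nil => simp
  | cons y ys ih =>
    simp only [List.cons_append, PySem.List.insertBy, h y (by simp)]
    simp only [Bool.false_eq_true, if_false, List.cons.injEq, true_and]
    exact ih (fun y hy => h y (by simp [hy]))

lemma pv_dropWhile_not_lt {κ : Type} [LinearOrder κ] (a : κ) (l : List κ)
    (hs : l.Pairwise (· < ·)) :
    ∀ k ∈ l.dropWhile (fun k => decide (k < a)), ¬ k < a := by
  induction l with
  | nil => simp
  | cons b l ih =>
    rw [List.pairwise_cons] at hs
    by_cases hb : b < a
    · rw [List.dropWhile_cons_of_pos (by simpa using hb)]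
      exact ih hs.2
    · rw [List.dropWhile_cons_of_neg (by simpa using hb)]
      intro k hk
      rcases List.mem_cons.mp hk with rfl | hk
      · exact hb
      · exact fun hlt => hb (lt_trans (hs.1 k hk) hlt) |>.elim

lemma pv_ins_grouped_mem {α κ : Type} [LinearOrder κ] (key : α → κ) (x : α)
    (ks : List κ) (g : κ → List α) (hs : ks.Pairwise (· < ·))
    (hg : ∀ k ∈ ks, ∀ y ∈ g k, key y = k)
    (hmem : key x ∈ ks) :
    PySem.List.insertBy (fun a b => decide (key a < key b)) x (ks.flatMap g)
      = ks.flatMap (fun k => if k = key x then g k ++ [x] else g k) := by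
  induction ks with
  | nil => simp at hmem
  | cons k0 kt ih =>
    rw [List.pairwise_cons] at hs
    have hfalse : ∀ y ∈ g k0, (fun a b => decide (key a < key b)) x y = false := by
      intro y hy
      have hky := hg k0 (by simp) y hy
      simp only [hky, decide_eq_false_iff_not]
      rcases List.mem_cons.mp hmem with he | ht
      · rw [he]; exact lt_irrefl _
      · exact not_lt_of_gt (hs.1 _ ht)
    rw [List.flatMap_cons, pv_ins_append _ _ _ _ hfalse, List.flatMap_cons]
    by_cases hx : key x = k0
    · have hx' : k0 = key x := hx.symm
      have hxrest : PySem.List.insertBy (fun a b => decide (key a < key b)) x (kt.flatMap g)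
          = x :: kt.flatMap g := by
        cases hrest : kt.flatMap g with
        | nil => simp [PySem.List.insertBy]
        | cons y t =>
          have hy : y ∈ kt.flatMap g := by rw [hrest]; simp
          obtain ⟨k, hk, hyg⟩ := List.mem_flatMap.mp hy
          have hky : key y = k := hg k (by simp [hk]) y hyg
          have hlt : key x < key y := by rw [hky, hx]; exact hs.1 _ hk
          simp [PySem.List.insertBy, hlt]
      rw [hxrest, if_pos hx']
      have : kt.flatMap (fun k => if k = key x then g k ++ [x] else g k) = kt.flatMap g := by
        apply pv_flatMap_congr_mem
        intro k hk
        rw [if_neg]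
        intro he; rw [he, hx] at hk
        exact lt_irrefl _ (hs.1 _ hk)
      rw [this]; simp
    · have ht : key x ∈ kt := by
        rcases List.mem_cons.mp hmem with he | ht
        · exact absurd he hx
        · exact ht
      rw [ih hs.2 (fun k hk => hg k (by simp [hk])) ht, if_neg (fun h => hx h.symm)]

lemma pv_ins_grouped_new {α κ : Type} [LinearOrder κ] (key : α → κ) (x : α)
    (ks : List κ) (g : κ → List α) (hs : ks.Pairwise (· < ·))
    (hg : ∀ k ∈ ks, ∀ y ∈ g k, key y = k) (hne : ∀ k ∈ ks, g k ≠ [])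
    (hmem : key x ∉ ks) :
    PySem.List.insertBy (fun a b => decide (key a < key b)) x (ks.flatMap g)
      = (ks.takeWhile (fun k => decide (k < key x))).flatMap g
        ++ x :: (ks.dropWhile (fun k => decide (k < key x))).flatMap g := by
  induction ks with
  | nil => simp [PySem.List.insertBy]
  | cons k0 kt ih =>
    rw [List.pairwise_cons] at hs
    by_cases hk0 : k0 < key x
    · have hfalse : ∀ y ∈ g k0, (fun a b => decide (key a < key b)) x y = false := by
        intro y hy
        have hky := hg k0 (by simp) y hy
        simp only [hky, decide_eq_false_iff_not]
        exact not_lt_of_gt hk0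
      rw [List.flatMap_cons, pv_ins_append _ _ _ _ hfalse,
        List.takeWhile_cons_of_pos (by simpa using hk0),
        List.dropWhile_cons_of_pos (by simpa using hk0),
        List.flatMap_cons,
        ih hs.2 (fun k hk => hg k (by simp [hk])) (fun k hk => hne k (by simp [hk]))
          (fun h => hmem (by simp [h])),
        List.append_assoc]
    · obtain ⟨y, t, hg0⟩ : ∃ y t, g k0 = y :: t := by
        cases hgg : g k0 with
        | nil => exact absurd hgg (hne k0 (by simp))
        | cons y t => exact ⟨y, t, rfl⟩
      have hky : key y = k0 := hg k0 (by simp) y (by simp [hg0])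
      have hxk0 : key x < k0 :=
        lt_of_le_of_ne (not_lt.mp hk0) (fun h => hmem (by simp [h]))
      rw [List.flatMap_cons, hg0, List.cons_append]
      have : PySem.List.insertBy (fun a b => decide (key a < key b)) x
          (y :: (t ++ kt.flatMap g)) = x :: y :: (t ++ kt.flatMap g) := by
        simp [PySem.List.insertBy, hky, hxk0]
      rw [this, List.takeWhile_cons_of_neg (by simpa using hk0),
        List.dropWhile_cons_of_neg (by simpa using hk0)]
      simp [hg0]

-- a stable sort is the sorted distinct keys, each replaced by its fiber in input order
lemma pv_stable_sorted_eq {α κ : Type} [LinearOrder κ] [BEq κ] [LawfulBEq κ]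
    (key : α → κ) (xs : List α) :
    PySem.List.sorted xs key
      = (PySem.List.sorted (PySem.Set.ofList (xs.map key)) (fun k => k)).flatMap
          (fun k => xs.filter (fun y => key y == k)) := by
  induction xs using List.reverseRecOn with
  | nil => simp [PySem.List.sorted, PySem.Set.ofList]
  | append_singleton xs x ih =>
    have hsnoc : PySem.List.sorted (xs ++ [x]) key
        = PySem.List.insertBy (fun a b => decide (key a < key b)) x (PySem.List.sorted xs key) := by
      rw [PySem.List.sorted_eq_foldl_insertBy, PySem.List.sorted_eq_foldl_insertBy,
        List.foldl_append]
      rfl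
    set ks := PySem.List.sorted (PySem.Set.ofList (xs.map key)) (fun k => k) with hks
    set g : κ → List α := fun k => xs.filter (fun y => key y == k) with hgdef
    have hpair : ks.Pairwise (· < ·) := PySem.List.sorted_ofList_pairwise_lt _
    have hg : ∀ k ∈ ks, ∀ y ∈ g k, key y = k := by
      intro k _ y hy
      simp only [hgdef, List.mem_filter, beq_iff_eq] at hy
      exact hy.2
    have hne : ∀ k ∈ ks, g k ≠ [] := by
      intro k hk
      have : k ∈ xs.map key := by
        have := (PySem.List.mem_sorted _ _ _ _).mp hk
        exact (PySem.Set.mem_ofList _ _).mp this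
      obtain ⟨y, hy, rfl⟩ := List.mem_map.mp this
      exact List.ne_nil_of_mem (List.mem_filter.mpr ⟨hy, by simp⟩)
    have hmapsnoc : (xs ++ [x]).map key = xs.map key ++ [key x] := by simp
    have hfiltersnoc : ∀ k, (xs ++ [x]).filter (fun y => key y == k)
        = g k ++ (if key x == k then [x] else []) := by
      intro k
      rw [List.filter_append]
      congr 1
      simp [List.filter_cons]
    by_cases hmem : key x ∈ ks
    · have hmemof : key x ∈ PySem.Set.ofList (xs.map key) :=
        (PySem.List.mem_sorted _ _ _ _).mp hmem
      have hsetsame : PySem.Set.ofList ((xs ++ [x]).map key) = PySem.Set.ofList (xs.map key) := by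
        rw [hmapsnoc, PySem.Set.ofList_append_singleton, PySem.Set.add_of_mem hmemof]
      rw [hsnoc, ih, pv_ins_grouped_mem key x ks g hpair hg hmem, hsetsame, ← hks]
      apply pv_flatMap_congr_mem
      intro k _
      rw [hfiltersnoc k]
      by_cases h : k = key x
      · rw [if_pos h, if_pos (by simp [h])]
      · rw [if_neg h, if_neg (by simp [Ne.symm h]), List.append_nil]
    · have hmemof : key x ∉ PySem.Set.ofList (xs.map key) := by
        intro h; exact hmem ((PySem.List.mem_sorted _ _ _ _).mpr h)
      have hsetnew : PySem.Set.ofList ((xs ++ [x]).map key)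
          = PySem.Set.ofList (xs.map key) ++ [key x] := by
        rw [hmapsnoc, PySem.Set.ofList_append_singleton, PySem.Set.add_of_not_mem hmemof]
      set T := ks.takeWhile (fun k => decide (k < key x)) with hT
      set D := ks.dropWhile (fun k => decide (k < key x)) with hD
      have hTD : T ++ D = ks := List.takeWhile_append_dropWhile
      have hDmem : ∀ k ∈ D, k ∈ ks := fun k hk => (List.dropWhile_sublist _).mem hk
      have hTlt : ∀ k ∈ T, k < key x := by
        intro k hk
        simpa using List.mem_takeWhile_imp hk
      have hDgt : ∀ k ∈ D, key x < k := by
        intro k hk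
        have h1 : ¬ k < key x := pv_dropWhile_not_lt (key x) ks hpair k hk
        have h2 : k ≠ key x := by
          intro h; rw [h] at hk; exact hmem (hDmem _ hk)
        exact lt_of_le_of_ne (not_lt.mp h1) (Ne.symm h2)
      have hsorted' : PySem.List.sorted (PySem.Set.ofList (xs.map key) ++ [key x]) (fun k : κ => k)
          = T ++ key x :: D := by
        apply PySem.List.sorted_eq_of_perm_of_pairwise_lt
        · refine (List.perm_middle).trans ?_
          rw [hTD]
          refine (List.Perm.cons _ (PySem.List.sorted_perm _ _ _)).trans ?_
          exact (List.perm_append_singleton _ _).symm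
        · have hTp : T.Pairwise (· < ·) := hpair.sublist (List.takeWhile_sublist _)
          have hDp : D.Pairwise (· < ·) := hpair.sublist (List.dropWhile_sublist _)
          rw [List.pairwise_append]
          refine ⟨hTp, ?_, ?_⟩
          · rw [List.pairwise_cons]
            exact ⟨fun k hk => hDgt k hk, hDp⟩
          · intro a ha b hb
            rcases List.mem_cons.mp hb with he | hd
            · rw [he]; exact hTlt a ha
            · exact lt_trans (hTlt a ha) (hDgt b hd)
      rw [hsnoc, ih, pv_ins_grouped_new key x ks g hpair hg hne hmem, hsetnew, hsorted',
        ← hT, ← hD]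
      rw [List.flatMap_append, List.flatMap_cons]
      have hTflat : T.flatMap (fun k => (xs ++ [x]).filter (fun y => key y == k)) = T.flatMap g := by
        apply pv_flatMap_congr_mem
        intro k hk
        rw [hfiltersnoc k, if_neg (by simp only [beq_iff_eq]; exact ne_of_gt (hTlt k hk)),
          List.append_nil]
      have hDflat : D.flatMap (fun k => (xs ++ [x]).filter (fun y => key y == k)) = D.flatMap g := by
        apply pv_flatMap_congr_mem
        intro k hk
        rw [hfiltersnoc k, if_neg (by simp only [beq_iff_eq]; exact ne_of_lt (hDgt k hk)),
          List.append_nil]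
      have hgx : g (key x) = [] := by
        rw [hgdef, List.filter_eq_nil_iff]
        intro y hy
        simp only [beq_iff_eq]
        intro h
        apply hmemof
        rw [PySem.Set.mem_ofList]
        exact List.mem_map.mpr ⟨y, hy, h⟩
      rw [hTflat, hDflat, hfiltersnoc (key x), if_pos (by simp), hgx, List.nil_append]
      simp

-- flatMap over a strictly sorted key list is unchanged by dropping keys with empty fibers
lemma pv_flatMap_eq_of_subset {κ α : Type} [LinearOrder κ] (F : κ → List α) :
    ∀ (ks' ks : List κ), ks'.Pairwise (· < ·) → ks.Pairwise (· < ·) →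
      (∀ k ∈ ks, k ∈ ks') → (∀ k ∈ ks', k ∉ ks → F k = []) →
      ks'.flatMap F = ks.flatMap F := by
  intro ks'
  induction ks' with
  | nil =>
    intro ks _ _ hsub _
    cases ks with
    | nil => rfl
    | cons m t => exact absurd (hsub m (by simp)) (by simp)
  | cons k0 kt ihk =>
    intro ks hp' hp hsub hemp
    rw [List.pairwise_cons] at hp'
    by_cases hk0 : k0 ∈ ks
    · cases ks with
      | nil => simp at hk0
      | cons m t =>
        rw [List.pairwise_cons] at hp
        have hm : m = k0 := by
          rcases List.mem_cons.mp (hsub m (by simp)) with he | ht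
          · exact he
          · rcases List.mem_cons.mp hk0 with he | ht0
            · exact he.symm
            · exact absurd (hp'.1 m ht) (not_lt_of_gt (hp.1 k0 ht0))
        subst hm
        rw [List.flatMap_cons, List.flatMap_cons]
        congr 1
        apply ihk t hp'.2 hp.2
        · intro k hk
          rcases List.mem_cons.mp (hsub k (by simp [hk])) with he | ht
          · exact absurd (hp.1 k hk) (by rw [he]; exact lt_irrefl _)
          · exact ht
        · intro k hk hnk
          apply hemp k (by simp [hk])
          intro hmem
          rcases List.mem_cons.mp hmem with he | ht
          · rw [he] at hk; exact lt_irrefl _ (hp'.1 _ hk)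
          · exact hnk ht
    · rw [List.flatMap_cons, hemp k0 (by simp) hk0, List.nil_append]
      apply ihk ks hp'.2 hp
      · intro k hk
        rcases List.mem_cons.mp (hsub k hk) with he | ht
        · rw [he] at hk; exact absurd hk hk0
        · exact ht
      · intro k hk hnk
        exact hemp k (by simp [hk]) hnk

-- ---- arithmetic / indexing bridges ----

lemma pv_colsOf_eq (cs : List Char) (L : Char) :
    pvColsOf cs L
      = ((List.range cs.length).filter (fun i => cs.getD i ' ' == L)).map (fun i : ℕ => (i : Int)) := by
  have h := pv_zipIdx_filter_map L ' ' cs 0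
  have h2 : ((cs.zipIdx.filter (fun p => p.1 == L)).map (fun p => p.2)).map (fun i : ℕ => (i : Int))
      = ((List.range cs.length).filter (fun i => cs.getD i ' ' == L)).map (fun i : ℕ => (i : Int)) := by
    rw [h, List.map_map]
    apply List.map_congr_left
    intro i _
    simp
  unfold pvColsOf
  rw [← h2, List.map_map]
  rfl

lemma pv_keyB_grid (cs : List Char) (r c : ℕ) (hc : c < cs.length) :
    pvKeyB cs ((r * cs.length + c : ℕ) : Int) = cs.getD c ' ' := by
  unfold pvKeyB
  rw [PySem.Int.mod_natCast]
  have hmod : (r * cs.length + c) % cs.length = c := by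
    rw [Nat.mul_add_mod']
    exact Nat.mod_eq_of_lt hc
  rw [hmod, PySem.List.pyGet?_natCast, List.getD_eq_getElem?_getD]

lemma pv_keyB_mem (cs : List Char) (hcs : cs ≠ []) (p : Int) : pvKeyB cs p ∈ cs := by
  unfold pvKeyB
  have hw : 0 < (cs.length : Int) := by
    have := List.length_pos_iff.mpr hcs
    exact_mod_cast this
  have h0 : 0 ≤ PySem.Int.mod p (cs.length : Int) := PySem.Int.mod_nonneg _ hw
  have h1 : PySem.Int.mod p (cs.length : Int) < (cs.length : Int) := PySem.Int.mod_lt _ hw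
  set m := PySem.Int.mod p (cs.length : Int) with hm
  have hcast : m = ((m.toNat : ℕ) : Int) := (Int.toNat_of_nonneg h0).symm
  have hlt : m.toNat < cs.length := by omega
  rw [hcast, PySem.List.pyGet?_natCast, List.getElem?_eq_getElem hlt]
  exact List.getElem_mem hlt

-- ---- the grid identity: A's row/column double loop for letter L is B's fiber of L ----

lemma pv_map_filter_congr {α β : Type} (l : List α) (p q : α → Bool) (f g : α → β)
    (hpq : ∀ c ∈ l, p c = q c) (hfg : ∀ c ∈ l, f c = g c) :
    (l.filter p).map f = (l.filter q).map g := by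
  rw [List.filter_congr hpq]
  apply List.map_congr_left
  intro c hc
  exact hfg c (List.mem_filter.mp hc).1

lemma pv_grid (cs : List Char) (length : Int) (hcs : cs ≠ []) (L : Char) :
    (PySem.List.pyRange 0 (PySem.Int.floordiv (length + (cs.length : Int) - 1) (cs.length : Int))).flatMap
      (fun r => ((pvColsOf cs L).filter (fun c => decide (r * (cs.length : Int) + c < length))).map
        (fun c => r * (cs.length : Int) + c))
      = (PySem.List.pyRange 0 length).filter (fun p => pvKeyB cs p == L) := by
  have hw : 0 < (cs.length : Int) := by
    have := List.length_pos_iff.mpr hcs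
    exact_mod_cast this
  set w : Int := (cs.length : Int) with hwdef
  set R : Int := PySem.Int.floordiv (length + w - 1) w with hRdef
  have hbr : R * w ≤ length + w - 1 ∧ length + w - 1 < (R + 1) * w :=
    (PySem.Int.floordiv_eq_iff_of_pos hw).mp rfl
  by_cases hlen : length ≤ 0
  · have hR : R ≤ 0 := by nlinarith [hbr.1, hbr.2]
    rw [PySem.List.pyRange_one_eq_nil hR, PySem.List.pyRange_one_eq_nil hlen]
    simp
  · rw [not_le] at hlen
    have hRnn : 0 ≤ R := by nlinarith [hbr.1, hbr.2]
    have hnle : length ≤ R * w := by nlinarith [hbr.2]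
    have hRcast : R = ((R.toNat : ℕ) : Int) := (Int.toNat_of_nonneg hRnn).symm
    have hncast : length = ((length.toNat : ℕ) : Int) := (Int.toNat_of_nonneg (le_of_lt hlen)).symm
    set RN := R.toNat with hRN
    set nN := length.toNat with hnN
    have hnle' : nN ≤ RN * cs.length := by
      have h := hnle
      rw [hRcast, hncast, hwdef] at h
      exact_mod_cast h
    rw [hRcast, hncast, PySem.List.pyRange_zero_natCast, PySem.List.pyRange_zero_natCast]
    -- right-hand side: pull the filters inside a Nat-range decomposition
    rw [List.filter_map, ← pv_range_filter_lt nN (RN * cs.length) hnle', List.filter_filter,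
      pv_range_mul_flatMap, List.filter_flatMap, List.map_flatMap]
    -- left-hand side: flatMap over the mapped row range
    rw [List.flatMap_map]
    apply pv_flatMap_congr_mem
    intro r hr
    rw [pv_colsOf_eq]
    simp only [List.filter_map, List.map_map, List.filter_filter, Function.comp_def]
    apply pv_map_filter_congr
    · intro c hc
      have hclen : c < cs.length := List.mem_range.mp hc
      rw [pv_keyB_grid cs r c hclen, Bool.and_comm]
      congr 1
      apply decide_eq_decide.mpr
      rw [hwdef]
      omega
    · intro c _
      rw [hwdef]
      push_cast
      ring

-- ---- A-side characterisation ----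

lemma pv_dict_getD (cs : List Char) (L : Char) :
    ((PySem.List.enumerate cs).foldl (fun d p => d.modify p.2 [] (fun l => l ++ [p.1]))
        (PySem.Dict.empty : PySem.Dict Char (List Int))).getD L []
      = pvColsOf cs L := by
  have h := PySem.Dict.getD_foldl_modify_append
    ((PySem.List.enumerate cs).map (fun p => (p.2, p.1)))
    (PySem.Dict.empty : PySem.Dict Char (List Int)) L
  rw [List.foldl_map] at h
  simp only [] at h
  rw [h]
  have hempty : (PySem.Dict.empty : PySem.Dict Char (List Int)).getD L [] = [] := by
    simp [pysem]
  rw [hempty, List.nil_append, PySem.List.enumerate_eq_zipIdx_map, List.map_map,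
    List.filter_map, List.map_map]
  unfold pvColsOf
  apply congrArg₂ _ ?_ ?_
  · funext p
    simp
  · apply congrArg₂ _ ?_ rfl
    funext p
    simp

lemma pv_dict_keys (cs : List Char) :
    ((PySem.List.enumerate cs).foldl (fun d p => d.modify p.2 [] (fun l => l ++ [p.1]))
        (PySem.Dict.empty : PySem.Dict Char (List Int))).keys = PySem.Set.ofList cs := by
  have h := PySem.Dict.keys_foldl_modify_key (PySem.List.enumerate cs) (fun p => p.2)
    ([] : List Int) (fun _ p => fun l => l ++ [p.1]) PySem.Dict.empty
  simp only [] at h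
  rw [h, PySem.Dict.keys_empty, PySem.List.map_snd_enumerate, PySem.Set.update_nil_left]

lemma pv_portA_eq (keyword : String) (length : Int) (hk : keyword ≠ "") :
    myszkowski_encrypt_perm keyword length
      = (PySem.List.sorted (PySem.Set.ofList keyword.toList) (fun c => c)).flatMap
          (fun L => (PySem.List.pyRange 0 length).filter (fun p => pvKeyB keyword.toList p == L)) := by
  have hcs : keyword.toList ≠ [] := by simpa using hk
  unfold myszkowski_encrypt_perm
  simp only [PySem.Str.len_eq, pv_dict_keys, pv_dict_getD]
  rw [PySem.List.foldl_congr_mem _ _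
    (fun (perm : List Int) (L : Char) => perm ++ (PySem.List.pyRange 0
        (PySem.Int.floordiv (length + (keyword.toList.length : Int) - 1) (keyword.toList.length : Int))).flatMap
      (fun r => ((pvColsOf keyword.toList L).filter
          (fun c => decide (r * (keyword.toList.length : Int) + c < length))).map
        (fun c => r * (keyword.toList.length : Int) + c))) [] ?_]
  · rw [PySem.List.foldl_append_eq_flatMap, List.nil_append]
    apply pv_flatMap_congr_mem
    intro L _
    exact pv_grid keyword.toList length hcs L
  · intro acc L _
    by_cases hone : (pvColsOf keyword.toList L).length = 1
    · rw [if_pos hone]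
      obtain ⟨c, hc⟩ := List.length_eq_one_iff.mp hone
      rw [hc]
      have hget : (PySem.List.pyGet? [c] 0).getD 0 = c := rfl
      rw [hget, PySem.List.foldl_append_ite (p := fun row : Int =>
          row * (keyword.toList.length : Int) + c < length)]
      congr 1
      rw [← pv_flatMap_ite_singleton]
      apply pv_flatMap_congr_mem
      intro r _
      rw [hc, List.filter_singleton]
      rw [Bool.cond_eq_ite]
      split_ifs <;> rfl
    · rw [if_neg hone]
      rw [PySem.List.foldl_congr_mem _ _
        (fun (perm : List Int) (row : Int) => perm ++ ((pvColsOf keyword.toList L).filter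
            (fun col => decide (row * (keyword.toList.length : Int) + col < length))).map
          (fun col => row * (keyword.toList.length : Int) + col)) acc ?_]
      · rw [PySem.List.foldl_append_eq_flatMap]
      · intro acc' row _
        exact PySem.List.foldl_append_ite (p := fun col : Int =>
          row * (keyword.toList.length : Int) + col < length) _ _ _

-- ---- B-side characterisation ----

lemma pv_portB_eq (keyword : String) (length : Int) :
    myszkowski_encrypt_perm_alt keyword length
      = (PySem.List.sorted (PySem.Set.ofList ((PySem.List.pyRange 0 length).map (pvKeyB keyword.toList))) (fun k => k)).flatMap
          (fun L => (PySem.List.pyRange 0 length).filter (fun p => pvKeyB keyword.toList p == L)) := by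
  have hkey : (fun i => (PySem.List.pyGet? keyword.toList (PySem.Int.mod i (PySem.Str.len keyword))).getD ' ')
      = pvKeyB keyword.toList := by
    funext i
    simp [pvKeyB, PySem.Str.len_eq]
  simp only [myszkowski_encrypt_perm_alt, hkey]
  exact pv_stable_sorted_eq (pvKeyB keyword.toList) _

-- ===== VERDICT (by name: the statement is the Claim_ definition above) =====
theorem myszkowski_encrypt_perm_spec : Claim_equal_myszkowski_encrypt_perm := by
  intro keyword length _ hpre
  unfold Spec_myszkowski_encrypt_perm
  have hcs : keyword.toList ≠ [] := by simpa using hpre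
  rw [pv_portA_eq keyword length hpre, pv_portB_eq keyword length]
  apply pv_flatMap_eq_of_subset _ _ _
    (PySem.List.sorted_ofList_pairwise_lt _) (PySem.List.sorted_ofList_pairwise_lt _)
  · intro k hk
    rw [PySem.List.mem_sorted, PySem.Set.mem_ofList] at hk ⊢
    obtain ⟨p, _, rfl⟩ := List.mem_map.mp hk
    exact pv_keyB_mem _ hcs p
  · intro k _ hnk
    rw [List.filter_eq_nil_iff]
    intro p hp
    simp only [beq_iff_eq]
    intro h
    apply hnk
    rw [PySem.List.mem_sorted, PySem.Set.mem_ofList]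
    exact List.mem_map.mpr ⟨p, hp, h⟩
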